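-- pv_equiv track=rewrite | github.com/arek-grows/Challenges | Challenges 161-180/Challenge179.py | goldbachs_conjecture
-- ===== SOURCE A (Python) =====
-- primes_up_to_97 = (2, 3, 5, 7, 11, 13, 17, 19, 23, 29, 31, 37, 41, 43, 47, 53, 59, 61, 67, 71,
--                     73, 79, 83, 89, 97)
--
-- def goldbachs_conjecture(number: int) -> list:
--     primes = []
--     set_list = []
--     for prime in primes_up_to_97:  # create a list of primes that are less than 'number' for efficient looping l8r
--         if prime >= number:
--             break
--         else:
--             primes.append(prime)
--
--     for a in primes:
--         for b in primes:
--             for c in primes: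
--                 new_set = [a, b, c]
--                 new_set.sort()
--                 if a + b + c == number and new_set not in set_list:
--                     set_list.append(new_set)
--     return set_list
-- ===== SOURCE B (Python) =====
-- primes_up_to_97 = (2, 3, 5, 7, 11, 13, 17, 19, 23, 29, 31, 37, 41, 43, 47, 53, 59, 61, 67, 71,
--                     73, 79, 83, 89, 97)
--
-- def goldbachs_conjecture(number: int) -> list:
--     primes = [p for p in primes_up_to_97 if p < number]
--     prime_set = set(primes)
--     result = []
--     for i, a in enumerate(primes):
--         for b in primes[i:]:
--             c = number - a - b
--             if c >= b and c in prime_set: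
--                 result.append([a, b, c])
--     return result
-- ===== Notes on version B (the rewrite author's own statement) =====
-- stated objective: simpler
-- what changed: A scans all ordered triples (a,b,c) of the eligible primes, sorts each hit and deduplicates with a linear 'not in result' scan; B loops only over ordered pairs a <= b (b taken from the suffix primes[i:]), computes c = number - a - b and emits [a,b,c] when c >= b and c is in a prebuilt prime set, producing each sorted triple exactly once in the same lexicographic order with no sort and no dedup.
import Mathlib
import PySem

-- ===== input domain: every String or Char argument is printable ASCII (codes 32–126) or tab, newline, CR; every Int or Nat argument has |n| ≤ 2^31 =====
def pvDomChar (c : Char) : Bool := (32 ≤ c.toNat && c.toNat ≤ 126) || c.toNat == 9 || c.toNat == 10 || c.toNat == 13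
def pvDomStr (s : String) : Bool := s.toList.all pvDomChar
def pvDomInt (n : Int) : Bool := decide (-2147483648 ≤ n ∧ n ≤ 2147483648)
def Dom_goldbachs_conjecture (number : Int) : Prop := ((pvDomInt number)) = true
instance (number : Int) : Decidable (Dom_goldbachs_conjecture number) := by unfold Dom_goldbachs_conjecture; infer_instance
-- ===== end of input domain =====

-- B replaces A's cubic scan-all-triples-with-dedup by a pair loop over ordered pairs (a ≤ b)
-- plus a set lookup for the third prime c = number - a - b (objective: simpler, same output order).


-- ===== PORT A =====
def pvPrimesUpTo97 : List Int :=
  [2, 3, 5, 7, 11, 13, 17, 19, 23, 29, 31, 37, 41, 43, 47, 53, 59, 61, 67, 71, 73, 79, 83, 89, 97]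

-- the first loop of A: append primes until one reaches 'number', then break
def pvTakePrimes (number : Int) : List Int → List Int
  | [] => []
  | p :: ps => if p ≥ number then [] else p :: pvTakePrimes number ps

def goldbachs_conjecture (number : Int) : List (List Int) :=
  let primes := pvTakePrimes number pvPrimesUpTo97
  primes.foldl (fun set_list a =>
    primes.foldl (fun set_list b =>
      primes.foldl (fun set_list c =>
        let new_set := PySem.List.sorted [a, b, c] (fun x => x) false
        if a + b + c = number ∧ new_set ∉ set_list then set_list ++ [new_set] else set_list)
        set_list) set_list) []

-- ===== PORT B =====
-- inner loop of B for one 'a' with bs = primes[i:]; outer loop = recursion over the suffixes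
def pvAltOuter (number : Int) (pset : PySem.Set Int) : List Int → List (List Int)
  | [] => []
  | a :: rest =>
      ((a :: rest).foldl (fun result b =>
        let c := number - a - b
        if b ≤ c ∧ PySem.Set.contains pset c then result ++ [[a, b, c]] else result) [])
      ++ pvAltOuter number pset rest

def goldbachs_conjecture_alt (number : Int) : List (List Int) :=
  let primes := pvPrimesUpTo97.filter (fun p => p < number)
  let prime_set := PySem.Set.ofList primes
  pvAltOuter number prime_set primes

-- ===== PRECONDITION & SPEC =====
def Spec_goldbachs_conjecture (number : Int) (out : List (List Int)) : Prop := out = goldbachs_conjecture_alt number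
instance (number : Int) (out : List (List Int)) : Decidable (Spec_goldbachs_conjecture number out) := by unfold Spec_goldbachs_conjecture; infer_instance

-- ===== CLAIM (what is proved, stated in full; the proofs are below) =====
def Claim_equal_goldbachs_conjecture : Prop := ∀ (number : Int), Dom_goldbachs_conjecture number → Spec_goldbachs_conjecture number (goldbachs_conjecture number)

-- ===== LEMMAS AND PROOFS =====

-- proof-side abbreviations
def pvSort3 (a b c : Int) : List Int := PySem.List.sorted [a, b, c] (fun x => x) false

def pvDStep (acc : List (List Int)) (t : List Int) : List (List Int) :=
  if t ∈ acc then acc else acc ++ [t]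

-- canonical form of B's output over a suffix of the prime list
def pvBout (n : Int) (P : List Int) : List Int → List (List Int)
  | [] => []
  | a :: rest =>
      ((a :: rest).filter (fun b => decide (b ≤ n - a - b) && decide (n - a - b ∈ P))).map
        (fun b => [a, b, n - a - b])
      ++ pvBout n P rest

-- triples guaranteed to be in the accumulator once A has fully processed the outer prefix preO
def pvTriOld (n : Int) (P preO : List Int) (t : List Int) : Prop :=
  ∃ x y z : Int, t = [x, y, z] ∧ x ≤ y ∧ y ≤ z ∧ x + y + z = n ∧ x ∈ preO ∧ y ∈ P ∧ z ∈ P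

-- ditto mid-block: outer element a current, inner prefix preB processed
def pvTriMid (n a : Int) (P preO preB : List Int) (t : List Int) : Prop :=
  pvTriOld n P preO t ∨
    ∃ y z : Int, t = [a, y, z] ∧ a ≤ y ∧ y ≤ z ∧ a + y + z = n ∧ y ∈ preB ∧ z ∈ P

lemma pvPrimes_pairwise : pvPrimesUpTo97.Pairwise (· ≤ ·) := by decide

lemma pvPrimes_pairwise_lt : pvPrimesUpTo97.Pairwise (· < ·) := by decide

-- A's break-loop = filter, on an ascending list
lemma pvTakePrimes_eq_filter (n : Int) :
    ∀ l : List Int, l.Pairwise (· ≤ ·) → pvTakePrimes n l = l.filter (fun p => p < n) := by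
  intro l
  induction l with
  | nil => intro _; rfl
  | cons p ps ih =>
    intro hp
    rcases List.pairwise_cons.mp hp with ⟨hhead, htail⟩
    by_cases h : p ≥ n
    · have hnil : ps.filter (fun p => decide (p < n)) = [] := by
        apply List.filter_eq_nil_iff.mpr
        intro q hq
        have := hhead q hq
        simp only [decide_eq_true_eq]
        omega
      rw [pvTakePrimes, if_pos h, List.filter_cons, if_neg (by simp; omega), hnil]
    · rw [pvTakePrimes, if_neg h, List.filter_cons, if_pos (by simp; omega), ih htail]

-- filtering a duplicate-free list for equality with k
lemma pvFilter_eq_singleton (k : Int) :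
    ∀ l : List Int, l.Nodup → l.filter (fun c => decide (c = k)) = if k ∈ l then [k] else [] := by
  intro l
  induction l with
  | nil => simp
  | cons d ds ih =>
    intro hnd
    rcases List.nodup_cons.mp hnd with ⟨hd, hds⟩
    by_cases h : d = k
    · subst h
      simp only [List.filter_cons, decide_true, List.mem_cons, true_or, if_pos]
      have hnil : ds.filter (fun c => decide (c = d)) = [] := by
        apply List.filter_eq_nil_iff.mpr
        intro c hc
        simp only [decide_eq_true_eq]
        rintro rfl; exact hd hc
      simp [hnil]
    · have hmem : k ∈ d :: ds ↔ k ∈ ds := by simp [Ne.symm h]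
      simp [h, ih hds, hmem]

-- positional facts from a sorted split
lemma pvMem_pre_of_lt {P pre rest : List Int} {a x : Int}
    (hP : P.Pairwise (· < ·)) (hs : P = pre ++ a :: rest) (hx : x ∈ P) (hlt : x < a) :
    x ∈ pre := by
  subst hs
  rcases List.mem_append.mp hx with h | h
  · exact h
  · exfalso
    have h2 := (List.pairwise_append.mp hP).2.1
    rcases List.mem_cons.mp h with rfl | h
    · omega
    · exact absurd (List.rel_of_pairwise_cons h2 h) (by omega)

lemma pvNot_mem_pre {P pre rest : List Int} {a : Int}
    (hP : P.Pairwise (· < ·)) (hs : P = pre ++ a :: rest) : a ∉ pre := by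
  subst hs
  intro h
  have := (List.pairwise_append.mp hP).2.2 a h a (List.mem_cons_self ..)
  omega

lemma pvFilter_ge {P pre rest : List Int} {a : Int}
    (hP : P.Pairwise (· < ·)) (hs : P = pre ++ a :: rest) :
    P.filter (fun b => decide (a ≤ b)) = a :: rest := by
  subst hs
  rw [List.filter_append]
  have h1 : pre.filter (fun b => decide (a ≤ b)) = [] := by
    apply List.filter_eq_nil_iff.mpr
    intro x hx
    have := (List.pairwise_append.mp hP).2.2 x hx a (List.mem_cons_self ..)
    simp only [decide_eq_true_eq]
    omega
  have h2 : (a :: rest).filter (fun b => decide (a ≤ b)) = a :: rest := by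
    apply List.filter_eq_self.mpr
    intro x hx
    rcases List.mem_cons.mp hx with rfl | hx
    · simp
    · have := List.rel_of_pairwise_cons (List.pairwise_append.mp hP).2.1 hx
      simp only [decide_eq_true_eq]
      omega
  rw [h1, h2, List.nil_append]

-- A's innermost (c) loop collapses to a single conditional dedup step
lemma pvInnerCollapse (n a b : Int) (Q : List Int) (hnd : Q.Nodup) (acc : List (List Int)) :
    Q.foldl (fun acc c =>
      if a + b + c = n ∧ pvSort3 a b c ∉ acc then acc ++ [pvSort3 a b c] else acc) acc
    = if n - a - b ∈ Q then pvDStep acc (pvSort3 a b (n - a - b)) else acc := by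
  have h1 : Q.foldl (fun acc c =>
      if a + b + c = n ∧ pvSort3 a b c ∉ acc then acc ++ [pvSort3 a b c] else acc) acc
      = Q.foldl (fun acc c => if a + b + c = n then pvDStep acc (pvSort3 a b c) else acc) acc := by
    apply PySem.List.foldl_congr_mem
    intro acc c _
    by_cases h1 : a + b + c = n <;> by_cases h2 : pvSort3 a b c ∈ acc <;>
      simp [pvDStep, h1, h2]
  rw [h1, PySem.List.foldl_ite_eq_foldl_filter]
  have h2 : Q.filter (fun c => decide (a + b + c = n)) = Q.filter (fun c => decide (c = n - a - b)) := by
    apply List.filter_congr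
    intro c _
    simp only [decide_eq_decide]
    omega
  rw [h2, pvFilter_eq_singleton (n - a - b) Q hnd]
  by_cases h : n - a - b ∈ Q <;> simp [h]

lemma pvPairwise3 {p q r : Int} (h1 : p ≤ q) (h2 : q ≤ r) :
    List.Pairwise (· ≤ ·) [p, q, r] := by
  refine List.Pairwise.cons ?_ (List.Pairwise.cons ?_ (List.pairwise_singleton _ _))
  · intro y hy
    simp only [List.mem_cons, List.not_mem_nil, or_false] at hy
    rcases hy with rfl | rfl <;> omega
  · intro y hy
    simp only [List.mem_singleton] at hy
    subst hy
    omega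

-- sorted-list evaluations of pvSort3, one per ordering of a, b, c
lemma pvSort3_abc {a b c : Int} (h1 : a ≤ b) (h2 : b ≤ c) : pvSort3 a b c = [a, b, c] := by
  unfold pvSort3
  apply PySem.List.sorted_id_eq_of_perm_of_pairwise
  · exact List.Perm.refl _
  · exact pvPairwise3 (by omega) (by omega)

lemma pvSort3_acb {a b c : Int} (h1 : a ≤ c) (h2 : c ≤ b) : pvSort3 a b c = [a, c, b] := by
  unfold pvSort3
  apply PySem.List.sorted_id_eq_of_perm_of_pairwise
  · exact List.Perm.cons a (List.Perm.swap b c [])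
  · exact pvPairwise3 (by omega) (by omega)

lemma pvSort3_cab {a b c : Int} (h1 : c ≤ a) (h2 : a ≤ b) : pvSort3 a b c = [c, a, b] := by
  unfold pvSort3
  apply PySem.List.sorted_id_eq_of_perm_of_pairwise
  · exact (List.Perm.swap a c [b]).trans (List.Perm.cons a (List.Perm.swap b c []))
  · exact pvPairwise3 (by omega) (by omega)

lemma pvSort3_bac {a b c : Int} (h1 : b ≤ a) (h2 : a ≤ c) : pvSort3 a b c = [b, a, c] := by
  unfold pvSort3
  apply PySem.List.sorted_id_eq_of_perm_of_pairwise
  · exact List.Perm.swap a b [c]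
  · exact pvPairwise3 (by omega) (by omega)

lemma pvSort3_bca {a b c : Int} (h1 : b ≤ c) (h2 : c ≤ a) : pvSort3 a b c = [b, c, a] := by
  unfold pvSort3
  apply PySem.List.sorted_id_eq_of_perm_of_pairwise
  · exact (List.Perm.cons b (List.Perm.swap a c [])).trans (List.Perm.swap a b [c])
  · exact pvPairwise3 (by omega) (by omega)

lemma pvSort3_cba {a b c : Int} (h1 : c ≤ b) (h2 : b ≤ a) : pvSort3 a b c = [c, b, a] := by
  unfold pvSort3
  apply PySem.List.sorted_id_eq_of_perm_of_pairwise
  · exact (List.Perm.swap b c [a]).trans ((List.Perm.cons b (List.Perm.swap a c [])).trans (List.Perm.swap a b [c]))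
  · exact pvPairwise3 (by omega) (by omega)

-- inner (b) loop of A, with the c loop already collapsed
lemma pvInner_aux (n a : Int) (P : List Int) (hP : P.Pairwise (· < ·))
    (preO restO : List Int) (hsO : P = preO ++ a :: restO) :
    ∀ (sufB preB : List Int) (acc : List (List Int)),
      P = preB ++ sufB →
      (∀ t, t ∈ acc ↔ pvTriMid n a P preO preB t) →
      sufB.foldl (fun acc b =>
          if n - a - b ∈ P then pvDStep acc (pvSort3 a b (n - a - b)) else acc) acc
        = acc ++ (sufB.filter (fun b =>
            decide (a ≤ b) && decide (b ≤ n - a - b) && decide (n - a - b ∈ P))).map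
            (fun b => [a, b, n - a - b]) := by
  intro sufB
  induction sufB with
  | nil => intro preB acc _ _; simp
  | cons b restB ih =>
    intro preB acc hsB hacc
    have hbP : b ∈ P := by rw [hsB]; simp
    have haP : a ∈ P := by rw [hsO]; simp
    have hanp : a ∉ preO := pvNot_mem_pre hP hsO
    have hbnp : b ∉ preB := pvNot_mem_pre hP hsB
    have hsB' : P = (preB ++ [b]) ++ restB := by rw [hsB]; simp
    rw [List.foldl_cons]
    by_cases hcP : n - a - b ∈ P
    · by_cases hk : a ≤ b ∧ b ≤ n - a - b
      · -- keeper: a genuinely new sorted triple is appended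
        have hsort : pvSort3 a b (n - a - b) = [a, b, n - a - b] := pvSort3_abc hk.1 hk.2
        have hnotmem : [a, b, n - a - b] ∉ acc := by
          intro hmem
          rcases (hacc _).mp hmem with ⟨x, y, z, he, _, _, _, hx, _, _⟩ | ⟨y, z, he, _, _, _, hy, _⟩
          · obtain ⟨rfl, rfl, rfl⟩ : a = x ∧ b = y ∧ n - a - b = z := by simpa using he
            exact hanp hx
          · obtain ⟨rfl, rfl⟩ : b = y ∧ n - a - b = z := by simpa using he
            exact hbnp hy
        rw [if_pos hcP, hsort, show pvDStep acc [a, b, n - a - b] = acc ++ [[a, b, n - a - b]] from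
          by simp [pvDStep, hnotmem]]
        have hacc' : ∀ t, t ∈ acc ++ [[a, b, n - a - b]] ↔
            pvTriMid n a P preO (preB ++ [b]) t := by
          intro t
          simp only [List.mem_append, List.mem_singleton]
          constructor
          · rintro (ht | rfl)
            · rcases (hacc t).mp ht with h | ⟨y, z, he, h1, h2, h3, hy, hz⟩
              · exact Or.inl h
              · exact Or.inr ⟨y, z, he, h1, h2, h3, by simp [hy], hz⟩
            · exact Or.inr ⟨b, n - a - b, rfl, hk.1, hk.2, by omega, by simp, hcP⟩
          · rintro (h | ⟨y, z, he, h1, h2, h3, hy, hz⟩)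
            · exact Or.inl ((hacc t).mpr (Or.inl h))
            · rcases List.mem_append.mp hy with hy | hy
              · exact Or.inl ((hacc t).mpr (Or.inr ⟨y, z, he, h1, h2, h3, hy, hz⟩))
              · have hyb : y = b := by simpa using hy
                subst hyb
                have hzc : z = n - a - y := by omega
                subst hzc
                exact Or.inr he
        rw [ih (preB ++ [b]) (acc ++ [[a, b, n - a - b]]) hsB' hacc']
        rw [List.filter_cons, if_pos (by simp [hk.1, hk.2, hcP])]
        simp
      · -- skipped: the sorted triple is already in the accumulator
        have hsum : a + b + (n - a - b) = n := by omega
        have hmem : pvSort3 a b (n - a - b) ∈ acc := by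
          by_cases hab : a ≤ b
          · have hcb : n - a - b < b := by
              rcases not_and_or.mp hk with h | h
              · omega
              · omega
            by_cases hac : a ≤ n - a - b
            · rw [pvSort3_acb hac (by omega)]
              exact (hacc _).mpr (Or.inr ⟨n - a - b, b, rfl, hac, by omega, by omega,
                pvMem_pre_of_lt hP hsB hcP hcb, hbP⟩)
            · rw [pvSort3_cab (by omega) hab]
              exact (hacc _).mpr (Or.inl ⟨n - a - b, a, b, rfl, by omega, hab, by omega,
                pvMem_pre_of_lt hP hsO hcP (by omega), haP, hbP⟩)
          · by_cases hbc : b ≤ n - a - b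
            · by_cases hac : a ≤ n - a - b
              · rw [pvSort3_bac (by omega) hac]
                exact (hacc _).mpr (Or.inl ⟨b, a, n - a - b, rfl, by omega, hac, by omega,
                  pvMem_pre_of_lt hP hsO hbP (by omega), haP, hcP⟩)
              · rw [pvSort3_bca hbc (by omega)]
                exact (hacc _).mpr (Or.inl ⟨b, n - a - b, a, rfl, hbc, by omega, by omega,
                  pvMem_pre_of_lt hP hsO hbP (by omega), hcP, haP⟩)
            · rw [pvSort3_cba (by omega) (by omega)]
              exact (hacc _).mpr (Or.inl ⟨n - a - b, b, a, rfl, by omega, by omega, by omega,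
                pvMem_pre_of_lt hP hsO hcP (by omega), hbP, haP⟩)
        rw [if_pos hcP, show pvDStep acc (pvSort3 a b (n - a - b)) = acc from
          by simp [pvDStep, hmem]]
        have hacc' : ∀ t, t ∈ acc ↔ pvTriMid n a P preO (preB ++ [b]) t := by
          intro t
          rw [hacc t]
          unfold pvTriMid
          constructor
          · rintro (h | ⟨y, z, he, h1, h2, h3, hy, hz⟩)
            · exact Or.inl h
            · exact Or.inr ⟨y, z, he, h1, h2, h3, by simp [hy], hz⟩
          · rintro (h | ⟨y, z, he, h1, h2, h3, hy, hz⟩)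
            · exact Or.inl h
            · rcases List.mem_append.mp hy with hy | hy
              · exact Or.inr ⟨y, z, he, h1, h2, h3, hy, hz⟩
              · exfalso
                have hyb : y = b := by simpa using hy
                subst hyb
                exact hk ⟨h1, by omega⟩
        rw [ih (preB ++ [b]) acc hsB' hacc']
        rw [List.filter_cons, if_neg (by simp; intro h1 h2; exact absurd ⟨h1, h2⟩ hk)]
    · -- c is not prime: nothing happens
      rw [if_neg hcP]
      have hacc' : ∀ t, t ∈ acc ↔ pvTriMid n a P preO (preB ++ [b]) t := by
        intro t
        rw [hacc t]
        unfold pvTriMid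
        constructor
        · rintro (h | ⟨y, z, he, h1, h2, h3, hy, hz⟩)
          · exact Or.inl h
          · exact Or.inr ⟨y, z, he, h1, h2, h3, by simp [hy], hz⟩
        · rintro (h | ⟨y, z, he, h1, h2, h3, hy, hz⟩)
          · exact Or.inl h
          · rcases List.mem_append.mp hy with hy | hy
            · exact Or.inr ⟨y, z, he, h1, h2, h3, hy, hz⟩
            · exfalso
              have hyb : y = b := by simpa using hy
              subst hyb
              have hzc : z = n - a - y := by omega
              subst hzc
              exact hcP hz
      rw [ih (preB ++ [b]) acc hsB' hacc']
      rw [List.filter_cons, if_neg (by simp [hcP])]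

-- outer (a) loop of A
lemma pvOuter_aux (n : Int) (P : List Int) (hP : P.Pairwise (· < ·)) :
    ∀ (sufO preO : List Int) (acc : List (List Int)),
      P = preO ++ sufO →
      (∀ t, t ∈ acc ↔ pvTriOld n P preO t) →
      sufO.foldl (fun acc a =>
          P.foldl (fun acc b =>
            if n - a - b ∈ P then pvDStep acc (pvSort3 a b (n - a - b)) else acc) acc) acc
        = acc ++ pvBout n P sufO := by
  intro sufO
  induction sufO with
  | nil => intro preO acc _ _; simp [pvBout]
  | cons a restO ih =>
    intro preO acc hsO hacc
    rw [List.foldl_cons]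
    have hmid : ∀ t, t ∈ acc ↔ pvTriMid n a P preO [] t := by
      intro t
      rw [hacc t]
      unfold pvTriMid
      constructor
      · exact Or.inl
      · rintro (h | ⟨y, z, _, _, _, _, hy, _⟩)
        · exact h
        · simp at hy
    rw [pvInner_aux n a P hP preO restO hsO P [] acc (by simp) hmid]
    have hfilter : P.filter (fun b =>
          decide (a ≤ b) && decide (b ≤ n - a - b) && decide (n - a - b ∈ P))
        = (a :: restO).filter (fun b => decide (b ≤ n - a - b) && decide (n - a - b ∈ P)) := by
      rw [← pvFilter_ge hP hsO, List.filter_filter]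
      apply List.filter_congr
      intro x _
      cases decide (a ≤ x) <;> cases decide (x ≤ n - a - x) <;> cases decide (n - a - x ∈ P) <;> rfl
    rw [hfilter]
    have hacc' : ∀ t, t ∈ acc ++ ((a :: restO).filter (fun b =>
          decide (b ≤ n - a - b) && decide (n - a - b ∈ P))).map (fun b => [a, b, n - a - b]) ↔
        pvTriOld n P (preO ++ [a]) t := by
      intro t
      simp only [List.mem_append]
      constructor
      · rintro (ht | ht)
        · obtain ⟨x, y, z, he, h1, h2, h3, hx, hy, hz⟩ := (hacc t).mp ht
          exact ⟨x, y, z, he, h1, h2, h3, by simp [hx], hy, hz⟩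
        · obtain ⟨b, hbf, rfl⟩ := List.mem_map.mp ht
          obtain ⟨hbm, hcond⟩ := List.mem_filter.mp hbf
          obtain ⟨hblec, hcp⟩ : b ≤ n - a - b ∧ n - a - b ∈ P := by simpa using hcond
          have hab : a ≤ b := by
            rcases List.mem_cons.mp hbm with rfl | hbm
            · exact le_refl b
            · have := List.rel_of_pairwise_cons (List.pairwise_append.mp (hsO ▸ hP)).2.1 hbm
              omega
          refine ⟨a, b, n - a - b, rfl, hab, hblec, by omega, by simp, ?_, hcp⟩
          rw [hsO]
          simp only [List.mem_append]
          exact Or.inr hbm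
      · rintro ⟨x, y, z, he, h1, h2, h3, hx, hy, hz⟩
        rcases List.mem_append.mp hx with hx | hx
        · exact Or.inl ((hacc t).mpr ⟨x, y, z, he, h1, h2, h3, hx, hy, hz⟩)
        · have hxa : x = a := by simpa using hx
          subst hxa
          right
          apply List.mem_map.mpr
          have hzy : z = n - x - y := by omega
          have hcond : (decide (y ≤ n - x - y) && decide (n - x - y ∈ P)) = true := by
            simp only [Bool.and_eq_true, decide_eq_true_eq]
            exact ⟨by omega, by rw [← hzy]; exact hz⟩
          refine ⟨y, List.mem_filter.mpr ⟨?_, hcond⟩, by rw [he, hzy]⟩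
          · -- y ∈ x :: restO
            rw [hsO] at hy
            rcases List.mem_append.mp hy with hy | hy
            · exfalso
              have := (List.pairwise_append.mp (hsO ▸ hP)).2.2 y hy x (List.mem_cons_self ..)
              omega
            · exact hy
    rw [ih (preO ++ [a]) _ (by rw [hsO]; simp) hacc']
    rw [pvBout]
    simp

-- A's port in collapsed double-fold form
lemma pvPortA_eq (n : Int) :
    goldbachs_conjecture n =
      (pvPrimesUpTo97.filter (fun p => p < n)).foldl (fun acc a =>
        (pvPrimesUpTo97.filter (fun p => p < n)).foldl (fun acc b =>
          if n - a - b ∈ pvPrimesUpTo97.filter (fun p => p < n) then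
            pvDStep acc (pvSort3 a b (n - a - b)) else acc) acc) [] := by
  have hnd : (pvPrimesUpTo97.filter (fun p => p < n)).Nodup :=
    (List.Pairwise.filter _ pvPrimes_pairwise_lt).imp (fun h => ne_of_lt h)
  simp only [goldbachs_conjecture, pvTakePrimes_eq_filter n _ pvPrimes_pairwise]
  apply PySem.List.foldl_congr_mem
  intro acc a _
  apply PySem.List.foldl_congr_mem
  intro acc b _
  exact pvInnerCollapse n a b _ hnd acc

-- B's port in pvBout form
lemma pvAltOuter_eq (n : Int) (Q : List Int) :
    ∀ s, pvAltOuter n (PySem.Set.ofList Q) s = pvBout n Q s := by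
  intro s
  induction s with
  | nil => rfl
  | cons a rest ih =>
    rw [pvAltOuter, pvBout, ih]
    congr 1
    rw [show (fun (result : List (List Int)) (b : Int) =>
          let c := n - a - b
          if b ≤ c ∧ PySem.Set.contains (PySem.Set.ofList Q) c then result ++ [[a, b, c]]
          else result)
        = (fun result b =>
          if b ≤ n - a - b ∧ PySem.Set.contains (PySem.Set.ofList Q) (n - a - b) = true
          then result ++ [[a, b, n - a - b]] else result) from rfl]
    rw [PySem.List.foldl_append_ite]
    rw [List.nil_append]
    congr 1
    apply List.filter_congr
    intro b _
    by_cases h1 : b ≤ n - a - b <;> by_cases h2 : (n - a - b) ∈ Q <;>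
      simp [h1, h2, PySem.Set.mem_ofList]

lemma pvPortB_eq (n : Int) :
    goldbachs_conjecture_alt n =
      pvBout n (pvPrimesUpTo97.filter (fun p => p < n)) (pvPrimesUpTo97.filter (fun p => p < n)) := by
  simp only [goldbachs_conjecture_alt]
  exact pvAltOuter_eq n _ _

-- ===== VERDICT (by name: the statement is the Claim_ definition above) =====
theorem goldbachs_conjecture_spec : Claim_equal_goldbachs_conjecture := by
  intro n _
  show goldbachs_conjecture n = goldbachs_conjecture_alt n
  have hP : (pvPrimesUpTo97.filter (fun p => p < n)).Pairwise (· < ·) :=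
    List.Pairwise.filter _ pvPrimes_pairwise_lt
  rw [pvPortA_eq, pvPortB_eq]
  simpa using pvOuter_aux n _ hP (pvPrimesUpTo97.filter (fun p => p < n)) [] []
    rfl (by simp [pvTriOld])
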